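-- pv_equiv track=rewrite | github.com/TheMorgus/DomNatMod | DomNatmod.py | get_line_command
-- ===== SOURCE A (Python) =====
-- def get_line_command(theline):
-- 	command = ""
-- 	for letter in theline:
-- 		if letter != " ":
-- 			command += letter
-- 		else:
-- 			break
-- 	return(command)
-- ===== SOURCE B (Python) =====
-- def get_line_command(theline):
--     idx = theline.find(' ')
--     return theline if idx == -1 else theline[:idx]
-- ===== Notes on version B (the rewrite author's own statement) =====
-- stated objective: simpler
-- what changed: Replaces the character-by-character accumulate-and-break loop with a single str.find index lookup followed by one slice, avoiding repeated string concatenation.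
import Mathlib
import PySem

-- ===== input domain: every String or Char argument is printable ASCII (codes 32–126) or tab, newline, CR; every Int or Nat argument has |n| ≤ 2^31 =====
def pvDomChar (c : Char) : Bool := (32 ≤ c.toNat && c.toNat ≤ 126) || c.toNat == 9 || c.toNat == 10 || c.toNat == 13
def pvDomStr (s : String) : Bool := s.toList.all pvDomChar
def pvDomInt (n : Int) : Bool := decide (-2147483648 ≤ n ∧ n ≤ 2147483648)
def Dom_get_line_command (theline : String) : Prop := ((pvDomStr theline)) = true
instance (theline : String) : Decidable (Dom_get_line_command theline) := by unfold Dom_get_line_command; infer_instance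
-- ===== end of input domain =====

-- B replaces A's accumulate-and-break character loop with one find(' ') lookup and a slice (objective: simpler).

-- ===== PORT A =====
-- the loop: command += letter until a space, then break
def pvGoA (acc : List Char) : List Char → List Char
  | [] => acc
  | c :: rest => if c ≠ ' ' then pvGoA (acc ++ [c]) rest else acc

def get_line_command (theline : String) : String :=
  String.ofList (pvGoA [] theline.toList)

-- ===== PORT B =====
def get_line_command_alt (theline : String) : String :=
  let idx := PySem.Str.find theline " "
  if idx = -1 then theline else String.ofList (PySem.List.slice theline.toList none (some idx))

-- ===== PRECONDITION & SPEC =====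
def Spec_get_line_command (theline : String) (out : String) : Prop := out = get_line_command_alt theline
instance (theline : String) (out : String) : Decidable (Spec_get_line_command theline out) := by unfold Spec_get_line_command; infer_instance

-- ===== CLAIM (what is proved, stated in full; the proofs are below) =====
def Claim_equal_get_line_command : Prop := ∀ (theline : String), Dom_get_line_command theline → Spec_get_line_command theline (get_line_command theline)

-- ===== LEMMAS AND PROOFS =====

-- A's loop builds acc ++ takeWhile (· ≠ ' ')
theorem pvGoA_eq (l : List Char) : ∀ acc, pvGoA acc l = acc ++ l.takeWhile (· ≠ ' ') := by
  induction l with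
  | nil => intro acc; simp [pvGoA]
  | cons c rest ih =>
    intro acc
    by_cases h : c = ' '
    · simp [pvGoA, h, List.takeWhile]
    · simp [pvGoA, h, List.takeWhile, ih]

-- take up to the first failing index is takeWhile
theorem take_eq_takeWhile {α : Type} (p : α → Bool) :
    ∀ (l : List α) (n : Nat), (∀ i, i < n → ∀ a, l[i]? = some a → p a = true) →
      (∀ a, l[n]? = some a → p a = false) → l.take n = l.takeWhile p := by
  intro l
  induction l with
  | nil => intro n _ _; simp
  | cons c rest ih =>
    intro n h1 h2
    cases n with
    | zero =>
      have := h2 c (by simp)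
      simp [List.takeWhile, this]
    | succ m =>
      have hc : p c = true := h1 0 (Nat.succ_pos m) c (by simp)
      have := ih m (fun i hi a ha => h1 (i+1) (by omega) a (by simpa using ha))
        (fun a ha => h2 a (by simpa using ha))
      simp [List.takeWhile, hc, this]

theorem singleton_prefix_drop {α : Type} (a : α) (l : List α) (i : Nat) :
    [a] <+: l.drop i ↔ l[i]? = some a := by
  constructor
  · rintro ⟨t, ht⟩
    have : (l.drop i)[0]? = some a := by rw [← ht]; simp
    simpa [List.getElem?_drop] using this
  · intro h
    have hi : i < l.length := (List.getElem?_eq_some_iff.mp h).1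
    have : l.drop i = a :: l.drop (i+1) := by
      rw [List.drop_eq_getElem_cons hi]
      simp [List.getElem?_eq_some_iff.mp h |>.2]
    exact ⟨l.drop (i+1), this.symm⟩

theorem key_lemma (l : List Char) :
    (if PySem.Chars.find l [' '] = -1 then l
     else PySem.List.slice l none (some (PySem.Chars.find l [' ']))) =
    l.takeWhile (· ≠ ' ') := by
  by_cases h : PySem.Chars.find l [' '] = -1
  · rw [if_pos h]
    have hnin : ¬ [' '] <:+: l := (PySem.Chars.find_eq_neg_one_iff l [' ']).mp h
    have hmem : (' ' : Char) ∉ l := fun hm => hnin ((List.singleton_infix_iff ' ' l).mpr hm)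
    symm
    apply List.takeWhile_eq_self_iff.mpr
    intro a ha
    simp only [decide_eq_true_eq]
    exact fun hab => hmem (hab ▸ ha)
  · rw [if_neg h]
    have hnn : 0 ≤ PySem.Chars.find l [' '] := by
      have := PySem.Chars.neg_one_le_find l [' ']
      omega
    obtain ⟨hpre, hfirst⟩ := PySem.Chars.find_spec (s := l) (sub := [' ']) hnn
    set n := (PySem.Chars.find l [' ']).toNat with hn
    have hcast : PySem.Chars.find l [' '] = ((n : Nat) : Int) := by
      rw [hn, Int.toNat_of_nonneg hnn]
    rw [hcast, PySem.List.slice_to_natCast]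
    apply take_eq_takeWhile
    · intro i hi a ha
      by_contra hc
      have : a = ' ' := by simpa using hc
      exact hfirst i hi ((singleton_prefix_drop ' ' l i).mpr (this ▸ ha))
    · intro a ha
      have hsp : l[n]? = some ' ' := (singleton_prefix_drop ' ' l n).mp hpre
      have : a = ' ' := by rw [ha] at hsp; simpa using hsp
      simp [this]

-- ===== VERDICT (by name: the statement is the Claim_ definition above) =====
theorem get_line_command_spec : Claim_equal_get_line_command := by
  intro theline _
  unfold Spec_get_line_command get_line_command get_line_command_alt
  rw [pvGoA_eq]
  simp only [List.nil_append, PySem.Str.find_eq, show (" " : String).toList = [' '] from rfl]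
  have hk := key_lemma theline.toList
  split
  · rename_i h
    rw [if_pos h] at hk
    rw [← hk]
    exact String.ofList_toList
  · rename_i h
    rw [if_neg h] at hk
    rw [← hk]
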